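-- pv_equiv track=rewrite | github.com/bxt/Ludus | unilectures.py/src/bxt/unilectures/theoinf/hausaufg02/aufg5_reviewed.py | ListGetElement
-- ===== SOURCE A (Python) =====
-- def maxPow(x):
--     pow=1
--     while(pow<=x):
--         pow=(pow+pow)
--     return pow
--
-- def ListGetElement(l,pos):
--     listpos=0 # Nummer des aktuellen Listeneintrags
--     result=0 # Gesuchte Nummer wird hier zusammengesetzt
--     p=maxPow(l)
--     preOne=0 # wie oben
--     even=1
--     thisOne=0 # >0 wenn aktuelles Element eine Eins
--     while(l>0): # Vorne>Hinten durch Binaerrepresentation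
--         if(p<=l): # Eins
--             l=(l-p)
--             thisOne=1
--         else: # Null
--             thisOne=0
--         l=(l+l)
--         if(thisOne>0):
--             preOne=1
--         else:
--             # Trenner-Erkennung
--             if((preOne>0) and(even>0)):
--                 listpos=(listpos+1)
--             preOne=0
--         if(listpos>pos):
--             l=0 # Schleife stoppen
--         else:
--             if(even>0):
--                 # Wenn kein Trenner kam, verdoppeln
--                 result=(result+result)
--         if(thisOne>0):
--             # Bei einer Eins an zweiter Stelle addieren
--             if((listpos==pos) and(even>0)):
--                 result=(result+1)
--         # Schleifenvariablen aktualisieren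
--         if(even>0):
--             even=0
--         else:
--             even=1
--     return result
-- ===== SOURCE B (Python) =====
-- def ListGetElement(l, pos):
--     # Decode the whole encoded list first, then index it (return 0 out of range).
--     if l <= 0:
--         return 0
--     t = format(l, "b").rstrip("0")
--     elems = []
--     cur = 0
--     i = 1
--     while i < len(t):
--         if t[i] == "1":
--             cur = cur * 2 + 1
--         elif t[i - 1] == "1":
--             elems.append(cur)
--             cur = 0
--         else:
--             cur = cur * 2
--         i += 2
--     elems.append(cur)
--     return elems[pos] if 0 <= pos < len(elems) else 0
-- ===== Notes on version B (the rewrite author's own statement) =====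
-- stated objective: simpler
-- what changed: B separates decoding from lookup: it turns l into its binary digit string (trailing zeros stripped, matching where A's shrinking l hits 0), reconstructs the whole encoded integer list in one pairwise pass over the digits, and finally indexes that list, instead of A's single interleaved loop that extracts bits arithmetically via a precomputed power and builds only the requested element with early stopping.
import Mathlib
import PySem

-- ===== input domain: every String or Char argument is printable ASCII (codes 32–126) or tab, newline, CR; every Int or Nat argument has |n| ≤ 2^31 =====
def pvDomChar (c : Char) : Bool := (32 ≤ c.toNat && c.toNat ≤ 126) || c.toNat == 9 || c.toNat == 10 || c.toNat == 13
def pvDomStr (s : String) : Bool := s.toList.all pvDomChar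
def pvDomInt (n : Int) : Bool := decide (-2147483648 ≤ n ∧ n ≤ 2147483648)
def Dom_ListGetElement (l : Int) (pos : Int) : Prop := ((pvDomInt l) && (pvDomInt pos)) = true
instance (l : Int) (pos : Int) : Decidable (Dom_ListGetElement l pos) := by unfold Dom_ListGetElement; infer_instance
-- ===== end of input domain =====

-- B re-implements the bit-decoder in two phases (decode the whole list, then index it) instead of
-- A's single interleaved early-stopping arithmetic loop; objective: simpler, not faster.

-- ===== PORT A =====
-- while(pow<=x): pow=(pow+pow)  — fuel is an upper bound on iterations, proven sufficient below
def pvMaxPowAux : Nat → Int → Int → Int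
  | 0, _, pow => pow
  | fuel+1, x, pow => if pow ≤ x then pvMaxPowAux fuel x (pow + pow) else pow

def pvMaxPow (x : Int) : Int := pvMaxPowAux (x.toNat + 1) x 1

-- the while(l>0) loop of ListGetElement, one constructor per iteration; fuel proven sufficient
def pvLoopA : Nat → Int → Int → Int → Int → Int → Int → Int → Int
  | 0, _, _, _, _, result, _, _ => result
  | fuel+1, l, p, pos, listpos, result, preOne, even =>
    if l > 0 then
      let thisOne : Int := if p ≤ l then 1 else 0
      let l1 := if p ≤ l then l - p else l
      let l2 := l1 + l1
      let listpos1 := if thisOne > 0 then listpos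
        else if preOne > 0 ∧ even > 0 then listpos + 1 else listpos
      let preOne1 : Int := if thisOne > 0 then 1 else 0
      let l3 := if listpos1 > pos then 0 else l2
      let result1 := if listpos1 > pos then result
        else if even > 0 then result + result else result
      let result2 := if thisOne > 0 ∧ listpos1 = pos ∧ even > 0 then result1 + 1 else result1
      let even1 : Int := if even > 0 then 0 else 1
      pvLoopA fuel l3 p pos listpos1 result2 preOne1 even1
    else result

def ListGetElement (l : Int) (pos : Int) : Int :=
  pvLoopA (l.toNat + 2) l (pvMaxPow l) pos 0 0 0 1

-- ===== PORT B =====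
-- t.rstrip("0") for a string: drop the trailing '0' characters (exact: rstrip with that char set)
def pvRstrip0 (cs : List Char) : List Char := (cs.reverse.dropWhile (· == '0')).reverse

-- the `while i < len(t)` loop of B: two characters (t[i-1], t[i]) per step, building `elems`
def pvParseB : List Char → Int → List Int
  | [], cur => [cur]
  | [_], cur => [cur]
  | a :: b :: rest, cur =>
    if b = '1' then pvParseB rest (cur * 2 + 1)
    else if a = '1' then cur :: pvParseB rest 0
    else pvParseB rest (cur * 2)

def ListGetElement_alt (l : Int) (pos : Int) : Int :=
  if l ≤ 0 then 0
  else
    let t := pvRstrip0 (PySem.Int.toBinChars l)   -- format(l, "b").rstrip("0")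
    let elems := pvParseB t 0
    if 0 ≤ pos ∧ pos < elems.length then elems.getD pos.toNat 0 else 0

-- ===== PRECONDITION & SPEC =====
def Spec_ListGetElement (l : Int) (pos : Int) (out : Int) : Prop := out = ListGetElement_alt l pos
instance (l : Int) (pos : Int) (out : Int) : Decidable (Spec_ListGetElement l pos out) := by unfold Spec_ListGetElement; infer_instance

-- ===== CLAIM (what is proved, stated in full; the proofs are below) =====
def Claim_equal_ListGetElement : Prop := ∀ (l : Int) (pos : Int), Dom_ListGetElement l pos → Spec_ListGetElement l pos (ListGetElement l pos)

-- ===== LEMMAS AND PROOFS =====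

-- binary digits of n, most significant first, [] for 0
def pvBits : Nat → List Char
  | 0 => []
  | n+1 => pvBits ((n+1)/2) ++ [Nat.digitChar ((n+1) % 2)]
decreasing_by exact Nat.div_lt_self (Nat.succ_pos n) (by omega)

-- value of a most-significant-first bit string
def pvVal : List Char → Nat
  | [] => 0
  | c :: cs => (if c = '1' then 2 ^ cs.length else 0) + pvVal cs

-- A's loop viewed as a machine over the extracted bit stream
def pvRun (pos : Int) : List Char → Int → Int → Int → Int → Int
  | [], _, result, _, _ => result
  | c :: cs, listpos, result, preOne, even =>
    let listpos1 := if c = '1' then listpos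
      else if preOne > 0 ∧ even > 0 then listpos + 1 else listpos
    let preOne1 : Int := if c = '1' then 1 else 0
    if listpos1 > pos then result
    else
      let result1 := if even > 0 then result + result else result
      let result2 := if c = '1' ∧ listpos1 = pos ∧ even > 0 then result1 + 1 else result1
      pvRun pos cs listpos1 result2 preOne1 (if even > 0 then 0 else 1)

lemma pvVal_lt (cs : List Char) : pvVal cs < 2 ^ cs.length := by
  induction cs with
  | nil => simp [pvVal]
  | cons c cs ih =>
    simp only [pvVal, List.length_cons, pow_succ]
    split_ifs <;> omega

lemma pvVal_append_singleton (cs : List Char) (c : Char) :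
    pvVal (cs ++ [c]) = 2 * pvVal cs + (if c = '1' then 1 else 0) := by
  induction cs with
  | nil => simp [pvVal]
  | cons d cs ih =>
    simp only [List.cons_append, pvVal, ih, List.length_append, List.length_cons,
      List.length_nil, pow_succ]
    split_ifs <;> ring

lemma pvVal_pvBits (n : Nat) : pvVal (pvBits n) = n := by
  induction n using Nat.strong_induction_on with
  | _ n ih =>
    match n with
    | 0 => simp [pvBits, pvVal]
    | n+1 =>
      rw [pvBits, pvVal_append_singleton, ih ((n+1)/2) (Nat.div_lt_self (Nat.succ_pos n) (by omega))]
      rcases Nat.mod_two_eq_zero_or_one (n+1) with h | h <;> rw [h] <;> simp [Nat.digitChar] <;> omega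

lemma pvBits_alpha (n : Nat) : ∀ c ∈ pvBits n, c = '0' ∨ c = '1' := by
  induction n using Nat.strong_induction_on with
  | _ n ih =>
    match n with
    | 0 => simp [pvBits]
    | n+1 =>
      rw [pvBits]
      intro c hc
      rcases List.mem_append.1 hc with h | h
      · exact ih ((n+1)/2) (Nat.div_lt_self (Nat.succ_pos n) (by omega)) c h
      · rcases Nat.mod_two_eq_zero_or_one (n+1) with h2 | h2 <;>
          simp [h2, Nat.digitChar] at h <;> simp [h]

lemma pvBits_bounds (n : Nat) (hn : n ≠ 0) :
    2 ^ ((pvBits n).length - 1) ≤ n ∧ n < 2 ^ (pvBits n).length := by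
  induction n using Nat.strong_induction_on with
  | _ n ih =>
    match n with
    | 0 => omega
    | n+1 =>
      rw [pvBits]
      by_cases h1 : n + 1 = 1
      · subst_eqs; simp_all [pvBits]
      · have hd : (n+1)/2 ≠ 0 := by omega
        have := ih ((n+1)/2) (Nat.div_lt_self (Nat.succ_pos n) (by omega)) hd
        have hlen : (pvBits ((n+1)/2)).length ≠ 0 := by
          intro h0
          have := pvVal_pvBits ((n+1)/2)
          rw [List.length_eq_zero_iff.1 h0] at this
          simp [pvVal] at this; omega
        simp only [List.length_append, List.length_cons, List.length_nil]
        constructor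
        · have : 2 ^ ((pvBits ((n+1)/2)).length - 1 + 1) ≤ ((n+1)/2) * 2 := by
            rw [pow_succ]; omega
          have he : (pvBits ((n+1)/2)).length - 1 + 1 = (pvBits ((n+1)/2)).length := by omega
          rw [he] at this
          have : (pvBits ((n+1)/2)).length + 1 - 1 = (pvBits ((n+1)/2)).length := by omega
          rw [this]; omega
        · rw [pow_succ]; omega

lemma pvToDigitsCore_eq (fuel : Nat) : ∀ (n : Nat) (acc : List Char), n ≠ 0 → n ≤ fuel →
    Nat.toDigitsCore 2 fuel n acc = pvBits n ++ acc := by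
  induction fuel with
  | zero => intro n acc h1 h2; omega
  | succ f ih =>
    intro n acc h1 h2
    match n, h1 with
    | n+1, _ =>
      rw [Nat.toDigitsCore]
      by_cases hz : (n+1) / 2 = 0
      · have : n = 0 := by omega
        subst this
        simp [hz, pvBits, Nat.digitChar]
      · simp only [hz, if_false]
        rw [ih ((n+1)/2) _ hz (by omega), pvBits]
        simp

lemma pvToBinChars_eq (l : Int) (hl : 0 < l) :
    PySem.Int.toBinChars l = pvBits l.toNat := by
  rw [PySem.Int.toBinChars]
  have : ¬ l < 0 := by omega
  simp only [this, if_false]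
  rw [Nat.toDigits, pvToDigitsCore_eq (l.toNat + 1) l.toNat [] (by omega) (by omega)]
  simp

lemma pvVal_eq_zero_of_all (cs : List Char) (h : ∀ c ∈ cs, (c == '0') = true) :
    pvVal cs = 0 := by
  induction cs with
  | nil => simp [pvVal]
  | cons c cs ih =>
    have hc : c = '0' := by have := h c (by simp); simpa using this
    have h1 : ¬ (c = '1') := by simp [hc]
    simp only [pvVal, h1, if_false]
    rw [ih (fun d hd => h d (by simp [hd]))]

lemma pvVal_zero_all (cs : List Char) (ha : ∀ c ∈ cs, c = '0' ∨ c = '1')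
    (hv : pvVal cs = 0) : ∀ c ∈ cs, (c == '0') = true := by
  induction cs with
  | nil => simp
  | cons c cs ih =>
    simp only [pvVal] at hv
    have hpow : 0 < 2 ^ cs.length := Nat.two_pow_pos cs.length
    have hc1 : ¬ (c = '1') := by intro h; rw [if_pos h] at hv; omega
    have hcs : pvVal cs = 0 := by split_ifs at hv <;> omega
    intro d hd
    rcases List.mem_cons.1 hd with h | h
    · subst h
      rcases ha d (by simp) with h | h
      · simp [h]
      · exact absurd h hc1
    · exact ih (fun e he => ha e (by simp [he])) hcs d h

lemma pvRstrip0_nil (cs : List Char) (ha : ∀ c ∈ cs, c = '0' ∨ c = '1')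
    (hv : pvVal cs = 0) : pvRstrip0 cs = [] := by
  rw [pvRstrip0]
  have : cs.reverse.dropWhile (· == '0') = [] := by
    rw [List.dropWhile_eq_nil_iff]
    intro c hc
    exact pvVal_zero_all cs ha hv c (List.mem_reverse.1 hc)
  simp [this]

lemma pvRstrip0_cons (b : Char) (bs : List Char) (ha : ∀ c ∈ b :: bs, c = '0' ∨ c = '1')
    (hv : pvVal (b :: bs) ≠ 0) : pvRstrip0 (b :: bs) = b :: pvRstrip0 bs := by
  by_cases hbs : pvVal bs = 0
  · have hb : b = '1' := by
      rcases ha b (by simp) with h | h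
      · exfalso; apply hv; simp [pvVal, h, hbs]
      · exact h
    have h1 : bs.reverse.dropWhile (· == '0') = [] := by
      rw [List.dropWhile_eq_nil_iff]
      intro c hc
      exact pvVal_zero_all bs (fun e he => ha e (by simp [he])) hbs c (List.mem_reverse.1 hc)
    have h2 : pvRstrip0 bs = [] := pvRstrip0_nil bs (fun e he => ha e (by simp [he])) hbs
    rw [pvRstrip0, List.reverse_cons, List.dropWhile_append, h1]
    simp [hb, h2]
  · have h1 : bs.reverse.dropWhile (· == '0') ≠ [] := by
      rw [Ne, List.dropWhile_eq_nil_iff]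
      intro hall
      exact hbs (pvVal_eq_zero_of_all bs (fun c hc => hall c (List.mem_reverse.2 hc)))
    rw [pvRstrip0, List.reverse_cons, List.dropWhile_append, pvRstrip0]
    simp only [List.isEmpty_iff, h1, if_false]
    simp

lemma pvLoopA_zero (f : Nat) (p pos lp r pre ev : Int) :
    pvLoopA f 0 p pos lp r pre ev = r := by
  cases f <;> simp [pvLoopA]

-- A's loop over l = (value of bs) · 2^(K-|bs|) with p = 2^(K-1) is the stream machine on bs
-- with the trailing zero bits (which A never reaches: l hits 0 first) stripped.
lemma pvLoopA_eq_run (pos : Int) : ∀ (bs : List Char) (K fuel : Nat) (lp r pre ev : Int),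
    bs.length ≤ K → (∀ c ∈ bs, c = '0' ∨ c = '1') → bs.length < fuel →
    pvLoopA fuel ((pvVal bs * 2 ^ (K - bs.length) : Nat) : Int) ((2 ^ (K-1) : Nat) : Int)
      pos lp r pre ev = pvRun pos (pvRstrip0 bs) lp r pre ev := by
  intro bs
  induction bs with
  | nil =>
    intro K fuel lp r pre ev hK ha hf
    have h0 : ((pvVal [] * 2 ^ (K - ([]:List Char).length) : Nat) : Int) = 0 := by simp [pvVal]
    rw [h0, pvLoopA_zero]
    simp [pvRstrip0, pvRun]
  | cons b bs ih =>
    intro K fuel lp r pre ev hK ha hf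
    by_cases hv : pvVal (b :: bs) = 0
    · rw [hv]
      simp only [Nat.zero_mul, Nat.cast_zero]
      rw [pvLoopA_zero, pvRstrip0_nil _ ha hv]
      simp [pvRun]
    · obtain ⟨f, rfl⟩ : ∃ f, fuel = f + 1 := ⟨fuel - 1, by omega⟩
      have hK1 : bs.length + 1 ≤ K := by simpa using hK
      have hf' : bs.length < f := by simp at hf; omega
      have ha' : ∀ c ∈ bs, c = '0' ∨ c = '1' := fun c hc => ha c (by simp [hc])
      have hexp : (K - (b::bs).length) + 1 = K - bs.length := by simp; omega
      have hdouble : pvVal bs * 2 ^ (K - (b::bs).length) + pvVal bs * 2 ^ (K - (b::bs).length)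
          = pvVal bs * 2 ^ (K - bs.length) := by
        rw [← hexp, pow_succ]; ring
      have t1 : ((1:Int) > 0) = True := by norm_num
      rw [pvRstrip0_cons b bs ha hv]
      by_cases hb : b = '1'
      · -- bit 1: l := l - p, then doubled
        have hNat : pvVal (b::bs) * 2 ^ (K - (b::bs).length)
            = 2 ^ (K - 1) + pvVal bs * 2 ^ (K - (b::bs).length) := by
          rw [show pvVal (b::bs) = 2 ^ bs.length + pvVal bs by simp [pvVal, hb], Nat.add_mul]
          congr 2
          rw [← Nat.pow_add]
          congr 1
          simp; omega
        rw [hNat]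
        have hgt : (0:Int) < ((2 ^ (K-1) + pvVal bs * 2 ^ (K - (b::bs).length) : Nat) : Int) := by
          have := Nat.two_pow_pos (K-1); exact_mod_cast Nat.lt_of_lt_of_le this (Nat.le_add_right _ _)
        have hple : (((2 ^ (K-1) : Nat)) : Int) ≤ ((2 ^ (K-1) + pvVal bs * 2 ^ (K - (b::bs).length) : Nat) : Int) := by
          exact_mod_cast Nat.le_add_right _ _
        have hsub : ((2 ^ (K-1) + pvVal bs * 2 ^ (K - (b::bs).length) : Nat) : Int)
            - ((2 ^ (K-1) : Nat) : Int) = ((pvVal bs * 2 ^ (K - (b::bs).length) : Nat) : Int) := by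
          push_cast; ring
        simp only [pvLoopA, if_pos hgt, eq_true hple, if_true, t1, gt_iff_lt, true_and]
        rw [hsub]
        have hdd : ((pvVal bs * 2 ^ (K - (b::bs).length) : Nat) : Int)
            + ((pvVal bs * 2 ^ (K - (b::bs).length) : Nat) : Int)
            = ((pvVal bs * 2 ^ (K - bs.length) : Nat) : Int) := by
          rw [← hdouble]; push_cast; ring
        rw [hdd]
        simp only [pvRun, hb, if_pos rfl, t1, gt_iff_lt, if_true, true_and]
        by_cases hstop : lp > pos
        · rw [if_pos hstop, if_pos hstop, pvLoopA_zero]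
          rw [if_neg (by rintro ⟨h1, _⟩; omega : ¬ (lp = pos ∧ 0 < ev)), if_pos hstop]
        · rw [if_neg hstop, if_neg hstop, if_neg hstop]
          exact ih K f lp _ 1 _ (by omega) ha' hf'
      · -- bit 0: l unchanged, then doubled
        have hbs0 : pvVal bs ≠ 0 := by
          intro h0; apply hv; simp [pvVal, hb, h0]
        have hNat : pvVal (b::bs) = pvVal bs := by simp [pvVal, hb]
        rw [hNat]
        have hgt : (0:Int) < ((pvVal bs * 2 ^ (K - (b::bs).length) : Nat) : Int) := by
          have h1 : 0 < pvVal bs * 2 ^ (K - (b::bs).length) :=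
            Nat.mul_pos (Nat.pos_of_ne_zero hbs0) (Nat.two_pow_pos _)
          exact_mod_cast h1
        have hplt : ¬ (((2 ^ (K-1) : Nat) : Int) ≤ ((pvVal bs * 2 ^ (K - (b::bs).length) : Nat) : Int)) := by
          have h1 : pvVal bs * 2 ^ (K - (b::bs).length) < 2 ^ (K-1) := by
            have h2 := pvVal_lt bs
            calc pvVal bs * 2 ^ (K - (b::bs).length)
                < 2 ^ bs.length * 2 ^ (K - (b::bs).length) :=
                  (Nat.mul_lt_mul_right (Nat.two_pow_pos _)).2 h2
              _ = 2 ^ (K - 1) := by rw [← Nat.pow_add]; congr 1; simp; omega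
          push_cast
          exact_mod_cast Nat.not_le.2 h1
        have hdd : ((pvVal bs * 2 ^ (K - (b::bs).length) : Nat) : Int)
            + ((pvVal bs * 2 ^ (K - (b::bs).length) : Nat) : Int)
            = ((pvVal bs * 2 ^ (K - bs.length) : Nat) : Int) := by
          rw [← hdouble]; push_cast; ring
        simp only [pvLoopA, if_pos hgt, if_neg hplt, gt_iff_lt, lt_self_iff_false, if_false]
        rw [hdd]
        simp only [pvRun, hb, if_neg hb, gt_iff_lt, lt_self_iff_false, false_and, if_false]
        by_cases hstop : (if pre > 0 ∧ ev > 0 then lp + 1 else lp) > pos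
        · simp only [gt_iff_lt] at hstop
          rw [if_pos hstop, if_pos hstop, pvLoopA_zero, if_pos hstop]
        · simp only [gt_iff_lt] at hstop
          rw [if_neg hstop, if_neg hstop, if_neg hstop]
          exact ih K f _ _ 0 _ (by omega) ha' hf'

-- odd stream position-- odd stream position (even = 0): the step only records preOne and flips even
lemma pvRun_odd (pos : Int) (c : Char) (cs : List Char) (lp r pre : Int) (h : lp ≤ pos) :
    pvRun pos (c :: cs) lp r pre 0 = pvRun pos cs lp r (if c = '1' then 1 else 0) 1 := by
  simp only [pvRun]
  have h0 : ¬ ((0:Int) > 0) := by norm_num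
  have hlp : (if c = '1' then lp else if pre > 0 ∧ (0:Int) > 0 then lp + 1 else lp) = lp := by
    split_ifs with h1 h2
    · rfl
    · exact absurd h2.2 h0
    · rfl
  rw [hlp, if_neg (by omega : ¬ lp > pos)]
  simp

-- the stream machine, started at an odd stream position with listpos ≤ pos, computes
-- "decode everything, then index" of B
lemma pvRun_eq_parse (pos : Int) (t : List Char) (cur : Int) : ∀ (lp r pre : Int),
    lp ≤ pos → (lp = pos → r = cur) → (lp < pos → r = 0) →
    pvRun pos t lp r pre 0 =
      if pos < lp + (pvParseB t cur).length then (pvParseB t cur).getD (pos - lp).toNat 0 else 0 := by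
  induction t, cur using pvParseB.induct with
  | case1 cur =>
    intro lp r pre h1 h2 h3
    simp only [pvRun, pvParseB, List.length_cons, List.length_nil]
    by_cases h : lp = pos
    · subst h
      rw [if_pos (by omega), show (lp - lp).toNat = 0 by omega]
      simpa using h2 rfl
    · rw [if_neg (by omega)]
      exact h3 (by omega)
  | case2 a cur =>
    intro lp r pre h1 h2 h3
    rw [pvRun_odd pos a [] lp r pre h1]
    simp only [pvRun, pvParseB, List.length_cons, List.length_nil]
    by_cases h : lp = pos
    · subst h
      rw [if_pos (by omega), show (lp - lp).toNat = 0 by omega]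
      simpa using h2 rfl
    · rw [if_neg (by omega)]
      exact h3 (by omega)
  | case3 a rest cur ih =>
    -- t = a :: '1' :: rest : a value bit 1, cur := cur * 2 + 1
    intro lp r pre h1 h2 h3
    rw [pvRun_odd pos a ('1' :: rest) lp r pre h1]
    simp only [pvRun, pvParseB]
    norm_num
    rw [if_neg (by omega : ¬ lp > pos)]
    by_cases h : lp = pos
    · rw [if_pos h]
      rw [ih lp (r + r + 1) 1 h1 (by intro _; rw [h2 h]; ring) (by omega)]
      simp only [List.getD_eq_getElem?_getD]
    · rw [if_neg h]
      rw [ih lp (r + r) 1 h1 (by omega) (by intro hlt; rw [h3 hlt]; norm_num)]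
      simp only [List.getD_eq_getElem?_getD]
  | case4 b rest cur hb ih =>
    -- t = '1' :: b :: rest with b ≠ '1' : separator, close the current element
    intro lp r pre h1 h2 h3
    rw [pvRun_odd pos '1' (b :: rest) lp r pre h1]
    simp only [pvRun, pvParseB, hb]
    norm_num
    by_cases h : lp = pos
    · -- the element being decoded is the requested one: A stops, B returns it by index
      rw [if_pos (by omega : pos ≤ lp)]
      rw [if_pos (by push_cast; omega)]
      rw [show (pos - lp).toNat = 0 by omega]
      simpa using h2 h
    · have hlt : lp < pos := by omega
      rw [if_neg (by omega : ¬ pos ≤ lp), h3 hlt]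
      norm_num
      rw [ih (lp + 1) 0 0 (by omega) (by omega) (by omega)]
      simp only [List.getD_eq_getElem?_getD]
      rw [if_congr (by omega : (pos < lp + 1 + ((pvParseB rest 0).length : Int)) ↔ (pos < lp + (((pvParseB rest 0).length : Int) + 1))) rfl rfl]
      by_cases hin : pos < lp + (((pvParseB rest 0).length : Int) + 1)
      · rw [if_pos hin, if_pos hin]
        rw [show (pos - lp).toNat = (pos - (lp + 1)).toNat + 1 by omega]
        simp
      · rw [if_neg hin, if_neg hin]
  | case5 a b rest cur hb ha ih =>
    -- a value bit 0, cur := cur * 2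
    intro lp r pre h1 h2 h3
    rw [pvRun_odd pos a (b :: rest) lp r pre h1]
    simp only [pvRun, pvParseB, hb, ha]
    simp only [ha, if_false, if_neg ha, if_neg hb]
    norm_num
    rw [if_neg (by omega : ¬ lp > pos)]
    rw [ih lp (r + r) 0 h1 (by intro h; rw [h2 h]; ring) (by intro hlt; rw [h3 hlt]; norm_num)]
    simp only [List.getD_eq_getElem?_getD]

lemma pvMaxPowAux_spec : ∀ (fuel : Nat) (x pow : Int), 0 < pow → x < pow * 2 ^ fuel →
    ∃ j : Nat, pvMaxPowAux fuel x pow = pow * 2 ^ j ∧ x < pow * 2 ^ j ∧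
      (j = 0 ∨ pow * 2 ^ (j-1) ≤ x) := by
  intro fuel
  induction fuel with
  | zero =>
    intro x pow hp hx
    exact ⟨0, by simp [pvMaxPowAux], by simpa using hx, Or.inl rfl⟩
  | succ f ih =>
    intro x pow hp hx
    rw [pvMaxPowAux]
    by_cases h : pow ≤ x
    · simp only [h, if_true]
      obtain ⟨j, he, hlt, hlo⟩ := ih x (pow + pow) (by omega)
        (by rw [pow_succ] at hx; nlinarith)
      refine ⟨j + 1, ?_, ?_, Or.inr ?_⟩
      · rw [he]; ring
      · rw [pow_succ]; nlinarith
      · rcases hlo with h0 | hle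
        · subst h0; simpa using h
        · cases j with
          | zero =>
            have h1 : (pow + pow) * 2 ^ (0 - 1) = pow + pow := by norm_num
            have h2 : pow * 2 ^ (0 + 1 - 1) = pow := by norm_num
            rw [h2]; rw [h1] at hle; omega
          | succ j' =>
            have : pow * 2 ^ (j' + 1 + 1 - 1) = (pow + pow) * 2 ^ (j' + 1 - 1) := by
              simp only [Nat.add_sub_cancel]; rw [pow_succ]; ring
            rw [this]; exact hle
    · exact ⟨0, by simp [h], by simpa using (not_le.1 h), Or.inl rfl⟩

lemma pvMaxPow_eq (l : Int) (hl : 0 < l) :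
    pvMaxPow l = ((2 ^ (pvBits l.toNat).length : Nat) : Int) := by
  have hn : l.toNat ≠ 0 := by omega
  obtain ⟨hb1, hb2⟩ := pvBits_bounds l.toNat hn
  have hcast : ((l.toNat : Int)) = l := Int.toNat_of_nonneg (by omega)
  have hfuel : l < 1 * 2 ^ (l.toNat + 1) := by
    have h1 : l.toNat < 2 ^ (l.toNat + 1) := Nat.lt_trans (Nat.lt_two_pow_self) (by
      exact Nat.pow_lt_pow_right (by norm_num) (by omega))
    have := (Nat.cast_lt (α := Int)).2 h1
    rw [hcast] at this
    simpa using this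
  obtain ⟨j, heq, hlt, hlo⟩ := pvMaxPowAux_spec (l.toNat + 1) l 1 (by norm_num) hfuel
  have hj0 : j ≠ 0 := by
    intro h0
    rw [h0] at hlt
    simp at hlt
    omega
  rcases hlo with h0 | hle
  · exact absurd h0 hj0
  -- move the sandwich to ℕ
  have hltN : l.toNat < 2 ^ j := by
    have : l < ((2 ^ j : Nat) : Int) := by simpa [Nat.cast_pow] using hlt
    omega
  have hleN : 2 ^ (j - 1) ≤ l.toNat := by
    have h1 : ((2 ^ (j-1) : Nat) : Int) ≤ l := by simpa [Nat.cast_pow] using hle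
    omega
  -- the two power sandwiches force j = (pvBits l.toNat).length
  have hlen0 : (pvBits l.toNat).length ≠ 0 := by
    intro h0
    rw [h0] at hb2
    simp at hb2
    omega
  have e1 : j - 1 < (pvBits l.toNat).length :=
    (Nat.pow_lt_pow_iff_right (by norm_num : 1 < 2)).1 (Nat.lt_of_le_of_lt hleN hb2)
  have e2 : (pvBits l.toNat).length - 1 < j :=
    (Nat.pow_lt_pow_iff_right (by norm_num : 1 < 2)).1 (Nat.lt_of_le_of_lt hb1 hltN)
  have : j = (pvBits l.toNat).length := by omega
  rw [pvMaxPow, heq, this]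
  simp [Nat.cast_pow]

theorem pv_main (l pos : Int) : ListGetElement l pos = ListGetElement_alt l pos := by
  by_cases hl : l ≤ 0
  · -- A's while-loop never starts; B returns 0 up front
    rw [ListGetElement, ListGetElement_alt, if_pos hl]
    have hng : ¬ l > 0 := by omega
    rw [show l.toNat + 2 = (l.toNat + 1) + 1 from rfl]
    rw [pvLoopA, if_neg hng]
  · push_neg at hl
    have hn0 : l.toNat ≠ 0 := by omega
    have halpha : ∀ c ∈ '0' :: pvBits l.toNat, c = '0' ∨ c = '1' := by
      intro c hc
      rcases List.mem_cons.1 hc with h | h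
      · exact Or.inl h
      · exact pvBits_alpha l.toNat c h
    have hfuel : ('0' :: pvBits l.toNat).length < l.toNat + 2 := by
      obtain ⟨hb1, _⟩ := pvBits_bounds l.toNat hn0
      have h1 : (pvBits l.toNat).length - 1 < 2 ^ ((pvBits l.toNat).length - 1) :=
        Nat.lt_two_pow_self
      simp only [List.length_cons]
      omega
    have key := pvLoopA_eq_run pos ('0' :: pvBits l.toNat) ('0' :: pvBits l.toNat).length
      (l.toNat + 2) 0 0 0 1 (le_refl _) halpha hfuel
    have he : ((pvVal ('0' :: pvBits l.toNat) * 2 ^ (('0' :: pvBits l.toNat).length - ('0' :: pvBits l.toNat).length) : Nat) : Int) = l := by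
      simp [pvVal, pvVal_pvBits]
      omega
    have hp : ((2 ^ (('0' :: pvBits l.toNat).length - 1) : Nat) : Int) = pvMaxPow l := by
      rw [pvMaxPow_eq l hl, show ('0' :: pvBits l.toNat).length - 1 = (pvBits l.toNat).length by simp]
    rw [he, hp] at key
    rw [ListGetElement, key]
    have hsval : pvVal ('0' :: pvBits l.toNat) ≠ 0 := by
      simp [pvVal, pvVal_pvBits]
      omega
    rw [pvRstrip0_cons '0' (pvBits l.toNat) halpha hsval]
    simp only [pvRun]
    have hc : ¬ (('0':Char) = '1') := by decide
    simp only [hc, false_and, if_false]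
    norm_num
    rw [ListGetElement_alt, if_neg (by omega : ¬ l ≤ 0)]
    simp only [pvToBinChars_eq l hl]
    by_cases hpos : pos < 0
    · rw [if_pos (by omega : pos < 0)]
      rw [if_neg (by rintro ⟨h1, _⟩; omega : ¬ (0 ≤ pos ∧ pos < ((pvParseB (pvRstrip0 (pvBits l.toNat)) 0).length : Int)))]
    · rw [if_neg (by omega : ¬ pos < 0)]
      rw [pvRun_eq_parse pos (pvRstrip0 (pvBits l.toNat)) 0 0 0 0 (by omega) (fun _ => rfl) (fun _ => rfl)]
      rw [if_congr (by omega :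
        (pos < 0 + ((pvParseB (pvRstrip0 (pvBits l.toNat)) 0).length : Int)) ↔
          (0 ≤ pos ∧ pos < ((pvParseB (pvRstrip0 (pvBits l.toNat)) 0).length : Int)))
        (by rw [show (pos - 0).toNat = pos.toNat by omega]) rfl]

-- ===== VERDICT (by name: the statement is the Claim_ definition above) =====
theorem ListGetElement_spec : Claim_equal_ListGetElement := by
  intro l pos _
  unfold Spec_ListGetElement
  exact pv_main l pos
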